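-- pv_equiv track=rewrite | github.com/danivalente87/network-discovery | network_discovery.py | find_hostnames
-- ===== SOURCE A (Python) =====
-- hosts = {
--     "P1": {
--         "host": "localhost",
--         "port": 12022,
--         "username": "cisco",
--         "password": "cisco",
--         "device_type": "1.1.1.1"
--     },
--     "P2": {
--         "host": "localhost",
--         "port": 13022,
--         "username": "cisco",
--         "password": "cisco",
--         "device_type": "2.2.2.2"
--     },
--     "P3": {
--         "host": "localhost",
--         "port": 14022,
--         "username": "cisco",
--         "password": "cisco01",
--         "device_type": "3.3.3.3"
--     },
--     "P4": {
--         "host": "localhost",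
--         "port": 15022,
--         "username": "cisco",
--         "password": "cisco01",
--         "device_type": "4.4.4.4"
--     },
--     "PE1": {
--         "host": "localhost",
--         "port": 10022,
--         "username": "cisco",
--         "password": "cisco",
--         "device_type": "7.7.7.7"
--     },
--     "P5": {
--         "host": "localhost",
--         "port": 16022,
--         "username": "cisco",
--         "password": "cisco",
--         "device_type": "5.5.5.5"
--     },
--     "P6": {
--         "host": "localhost",
--         "port": 17022,
--         "username": "cisco",
--         "password": "cisco",
--         "device_type": "6.6.6.6"
--     }
-- }
--
-- def find_hostnames(core_per_neighbor_dict):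
--         hostnames = {}
--         if core_per_neighbor_dict == '':
--             return ''
--         for neighbor_ip in core_per_neighbor_dict.keys():
--             hostnames[neighbor_ip] = "NULL"
--             for device in hosts.keys():
--                 if neighbor_ip == hosts[device]['device_type']:
--                     hostnames[neighbor_ip] = device
--
--         return hostnames
-- ===== SOURCE B (Python) =====
-- hosts = {
--     "P1": {"host": "localhost", "port": 12022, "username": "cisco", "password": "cisco", "device_type": "1.1.1.1"},
--     "P2": {"host": "localhost", "port": 13022, "username": "cisco", "password": "cisco", "device_type": "2.2.2.2"},
--     "P3": {"host": "localhost", "port": 14022, "username": "cisco", "password": "cisco01", "device_type": "3.3.3.3"},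
--     "P4": {"host": "localhost", "port": 15022, "username": "cisco", "password": "cisco01", "device_type": "4.4.4.4"},
--     "PE1": {"host": "localhost", "port": 10022, "username": "cisco", "password": "cisco", "device_type": "7.7.7.7"},
--     "P5": {"host": "localhost", "port": 16022, "username": "cisco", "password": "cisco", "device_type": "5.5.5.5"},
--     "P6": {"host": "localhost", "port": 17022, "username": "cisco", "password": "cisco", "device_type": "6.6.6.6"},
-- }
--
-- def find_hostnames(core_per_neighbor_dict):
--     if core_per_neighbor_dict == '':
--         return ''
--     reverse = {cfg['device_type']: name for name, cfg in hosts.items()}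
--     return {ip: reverse.get(ip, "NULL") for ip in core_per_neighbor_dict}
-- ===== Notes on version B (the rewrite author's own statement) =====
-- stated objective: faster
-- what changed: Builds a reverse index device_type->name once and replaces A's inner scan over the hosts table with a single dict lookup per neighbor IP.
import Mathlib
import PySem

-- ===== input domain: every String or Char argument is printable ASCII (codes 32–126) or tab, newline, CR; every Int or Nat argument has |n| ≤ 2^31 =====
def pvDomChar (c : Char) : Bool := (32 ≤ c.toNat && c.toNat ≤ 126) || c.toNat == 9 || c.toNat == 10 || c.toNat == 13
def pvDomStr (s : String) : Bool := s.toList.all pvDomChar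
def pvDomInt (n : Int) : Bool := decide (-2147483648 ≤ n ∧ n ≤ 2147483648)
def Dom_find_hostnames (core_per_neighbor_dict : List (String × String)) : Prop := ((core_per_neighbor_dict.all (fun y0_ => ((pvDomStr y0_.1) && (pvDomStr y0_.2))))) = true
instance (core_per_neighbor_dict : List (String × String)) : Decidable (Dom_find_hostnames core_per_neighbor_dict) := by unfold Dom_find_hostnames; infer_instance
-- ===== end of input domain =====

-- B replaces A's inner scan of the hosts table per neighbor with one prebuilt reverse index (simpler).
-- The Python `if core_per_neighbor_dict == '': return ''` branch never fires for a dict argument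
-- (a dict never equals ''), so under the dict typing both ports omit it.

-- ===== PORT A =====
-- the module-level hosts table, restricted to the only field A reads (device name, device_type)
def hostsTbl : List (String × String) :=
  [("P1", "1.1.1.1"), ("P2", "2.2.2.2"), ("P3", "3.3.3.3"), ("P4", "4.4.4.4"),
   ("PE1", "7.7.7.7"), ("P5", "5.5.5.5"), ("P6", "6.6.6.6")]

def find_hostnames (core_per_neighbor_dict : List (String × String)) : List (String × String) :=
  -- hostnames = {}; for neighbor_ip in keys: hostnames[ip] = "NULL"; for device in hosts: if match: hostnames[ip] = device
  (core_per_neighbor_dict.foldl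
    (fun hostnames p =>
      hostsTbl.foldl
        (fun hostnames dev => if p.1 == dev.2 then hostnames.insert p.1 dev.1 else hostnames)
        (hostnames.insert p.1 "NULL"))
    PySem.Dict.empty).items

-- ===== PORT B =====
def reverseIdx : PySem.Dict String String :=
  hostsTbl.foldl (fun d p => d.insert p.2 p.1) PySem.Dict.empty

def find_hostnames_alt (core_per_neighbor_dict : List (String × String)) : List (String × String) :=
  (core_per_neighbor_dict.foldl
    (fun hostnames p => hostnames.insert p.1 (reverseIdx.getD p.1 "NULL"))
    PySem.Dict.empty).items

-- ===== PRECONDITION & SPEC =====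
def Spec_find_hostnames (core_per_neighbor_dict : List (String × String)) (out : List (String × String)) : Prop := out = find_hostnames_alt core_per_neighbor_dict
instance (core_per_neighbor_dict : List (String × String)) (out : List (String × String)) : Decidable (Spec_find_hostnames core_per_neighbor_dict out) := by unfold Spec_find_hostnames; infer_instance

-- ===== CLAIM (what is proved, stated in full; the proofs are below) =====
def Claim_equal_find_hostnames : Prop := ∀ (core_per_neighbor_dict : List (String × String)), Dom_find_hostnames core_per_neighbor_dict → Spec_find_hostnames core_per_neighbor_dict (find_hostnames core_per_neighbor_dict)

-- ===== LEMMAS AND PROOFS =====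

-- A's inner scan over the hosts table net-updates the dict exactly like B's reverse-index lookup.
theorem inner_eq (h : PySem.Dict String String) (ip : String) :
    hostsTbl.foldl
      (fun hostnames dev => if ip == dev.2 then hostnames.insert ip dev.1 else hostnames)
      (h.insert ip "NULL")
    = h.insert ip (reverseIdx.getD ip "NULL") := by
  simp only [hostsTbl, reverseIdx, List.foldl]
  by_cases h1 : ip = "1.1.1.1" <;> by_cases h2 : ip = "2.2.2.2" <;>
  by_cases h3 : ip = "3.3.3.3" <;> by_cases h4 : ip = "4.4.4.4" <;>
  by_cases h5 : ip = "7.7.7.7" <;> by_cases h6 : ip = "5.5.5.5" <;>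
  by_cases h7 : ip = "6.6.6.6" <;>
    simp_all [PySem.Dict.insert_insert_self, PySem.Dict.getD_insert, PySem.Dict.getD_empty]

theorem fold_eq (l : List (String × String)) (h : PySem.Dict String String) :
    l.foldl
      (fun hostnames p =>
        hostsTbl.foldl
          (fun hostnames dev => if p.1 == dev.2 then hostnames.insert p.1 dev.1 else hostnames)
          (hostnames.insert p.1 "NULL")) h
    = l.foldl (fun hostnames p => hostnames.insert p.1 (reverseIdx.getD p.1 "NULL")) h := by
  induction l generalizing h with
  | nil => rfl
  | cons p t ih => simp only [List.foldl, inner_eq, ih]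

-- ===== VERDICT (by name: the statement is the Claim_ definition above) =====
theorem find_hostnames_spec : Claim_equal_find_hostnames := by
  intro core _
  unfold Spec_find_hostnames find_hostnames find_hostnames_alt
  rw [fold_eq]
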